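-- pv_equiv track=rewrite | github.com/the-rivulet/discohook-starter-vercel | main.py | look_for
-- ===== SOURCE A (Python) =====
-- def look_for(l: dict, target: str):
--     # check for exact matches
--     for i in l:
--         if i == target:
--             return i
--     # look for the closest match
--     best_match = None
--     best_share = 0
--     for item in l:
--         shared = 0
--         # find how many characters it shares
--         for i in range(len(item)):
--             x = 1
--             while i + x <= len(item) and item[i : (i + x)] in target:
--                 shared = max(shared, x)
--                 x += 1
--         if shared > best_share:
--             best_share = shared
--             best_match = item
--     return best_match
-- ===== SOURCE B (Python) =====
-- def _best_shared(item, t):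
--     # classic longest-common-substring DP: row[j] = length of the longest common
--     # suffix of the processed prefix of item and t[:j+1]; answer = max cell
--     row = [0] * len(t)
--     s = 0
--     for ch in item:
--         new = []
--         diag = 0
--         for j in range(len(t)):
--             v = diag + 1 if ch == t[j] else 0
--             new.append(v)
--             diag = row[j]
--         row = new
--         for v in row:
--             if v > s:
--                 s = v
--     return s
--
-- def look_for(l: dict, target: str):
--     if target in l:
--         return target
--     scored = [(item, _best_shared(item, target)) for item in l]
--     best = max(scored, key=lambda p: p[1], default=(None, 0))
--     return best[0] if best[1] > 0 else None
-- ===== Notes on version B (the rewrite author's own statement) =====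
-- stated objective: alternative
-- what changed: B replaces A's substring probing (for every start position grow a window while the slice occurs in target, tested by 'in') with the classic longest-common-substring dynamic programme: one row per item character holding longest-common-suffix lengths against each prefix of target, taking the row maximum; the exact-match scan becomes a membership test and the best item is picked as a max over (item, score) pairs. Not faster in measured CPython wall time (A's inner test runs in C).
import Mathlib
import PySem

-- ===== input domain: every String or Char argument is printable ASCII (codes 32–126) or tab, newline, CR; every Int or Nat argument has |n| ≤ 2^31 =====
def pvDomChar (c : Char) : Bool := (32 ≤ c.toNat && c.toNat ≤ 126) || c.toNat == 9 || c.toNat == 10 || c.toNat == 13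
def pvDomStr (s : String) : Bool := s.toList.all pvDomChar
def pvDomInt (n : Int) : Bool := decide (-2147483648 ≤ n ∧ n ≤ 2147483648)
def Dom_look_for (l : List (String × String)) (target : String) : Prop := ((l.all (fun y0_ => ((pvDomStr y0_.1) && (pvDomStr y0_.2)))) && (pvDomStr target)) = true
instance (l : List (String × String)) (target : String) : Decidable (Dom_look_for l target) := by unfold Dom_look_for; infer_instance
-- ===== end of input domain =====

-- B replaces A's slice-probing search (grow a window at every start while the slice occurs in
-- target) with the classic longest-common-substring row DP and a max over scored items;
-- objective: alternative algorithm of similar size (no speed claim; measured slower in CPython).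


-- ===== PORT A =====
-- inner while loop of A: `while i + x <= len(item) and item[i:(i+x)] in target: shared = max(shared, x); x += 1`
-- fuel bounds the iterations (at most item.length, since x grows and needs i + x ≤ item.length);
-- running out of fuel returns `shared`, exactly what the failing loop condition returns.
def whileA (item target : List Char) (i : Nat) : Nat → Nat → Nat → Nat
  | _, shared, 0 => shared
  | x, shared, fuel + 1 =>
    if i + x ≤ item.length ∧
        PySem.Chars.isIn (PySem.List.slice item (some (i : Int)) (some ((i : Int) + (x : Int)))) target
    then whileA item target i (x + 1) (max shared x) fuel
    else shared

-- the per-item nested loops of A: `shared = 0; for i in range(len(item)): x = 1; while …`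
def sharedA (item target : List Char) : Nat :=
  (List.range item.length).foldl (fun shared i => whileA item target i 1 shared item.length) 0

def look_for (l : List (String × String)) (target : String) : Option String :=
  let keys := (PySem.Dict.ofList l).keys
  match keys.find? (fun i => i == target) with
  | some i => some i
  | none =>
    let r := keys.foldl (fun (acc : Option String × Nat) item =>
        let shared := sharedA item.toList target.toList
        if shared > acc.2 then (some item, shared) else acc) (none, 0)
    r.1

-- ===== PORT B =====
-- inner row loop of B's _best_shared: iterate over (t[j], row[j]) carrying the running
-- diagonal value; `v = diag + 1 if ch == t[j] else 0; new.append(v); diag = row[j]`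
def rowGo (c : Char) : List (Char × Nat) → Nat → List Nat
  | [], _ => []
  | (tc, p) :: rest, diag => (if c = tc then diag + 1 else 0) :: rowGo c rest p

-- _best_shared: one DP row per item character, `s` updated by scanning the fresh row
def bestShared (item t : List Char) : Nat :=
  (item.foldl (fun (acc : Nat × List Nat) ch =>
      let nr := rowGo ch (t.zip acc.2) 0
      (nr.foldl (fun s v => if v > s then v else s) acc.1, nr))
    (0, List.replicate t.length 0)).1

def look_for_alt (l : List (String × String)) (target : String) : Option String :=
  let keys := (PySem.Dict.ofList l).keys
  if keys.contains target then some target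
  else
    let scored := keys.map (fun item => ((some item : Option String), bestShared item.toList target.toList))
    let best := PySem.List.maxD scored (fun p => p.2) ((none : Option String), 0)
    if best.2 > 0 then best.1 else none

-- ===== PRECONDITION & SPEC =====
def Spec_look_for (l : List (String × String)) (target : String) (out : Option String) : Prop := out = look_for_alt l target
instance (l : List (String × String)) (target : String) (out : Option String) : Decidable (Spec_look_for l target out) := by unfold Spec_look_for; infer_instance

-- ===== CLAIM (what is proved, stated in full; the proofs are below) =====
def Claim_equal_look_for : Prop := ∀ (l : List (String × String)) (target : String), Dom_look_for l target → Spec_look_for l target (look_for l target)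

-- ===== LEMMAS AND PROOFS =====

-- `Good item target k`: some window of item of length k (k ≥ 1) is a substring of target.
def Good (item target : List Char) (k : Nat) : Prop :=
  1 ≤ k ∧ ∃ i, i + k ≤ item.length ∧ (item.drop i).take k <:+: target

-- the slice/isIn condition of A, in terms of Good's window
theorem cond_iff {item target : List Char} {i k : Nat} :
    (PySem.Chars.isIn (PySem.List.slice item (some (i : Int)) (some ((i : Int) + (k : Int)))) target = true)
      ↔ (item.drop i).take k <:+: target := by
  rw [PySem.List.slice_natCast_add, PySem.Chars.isIn_iff_infix]

-- ---------- A side ----------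

theorem whileA_ge (item target : List Char) (i : Nat) :
    ∀ fuel x shared, shared ≤ whileA item target i x shared fuel := by
  intro fuel
  induction fuel with
  | zero => intro x shared; simp [whileA]
  | succ fuel ih =>
    intro x shared
    simp only [whileA]
    split
    · exact le_trans (le_max_left _ _) (ih (x + 1) (max shared x))
    · exact le_rfl

theorem whileA_sound (item target : List Char) (i : Nat) :
    ∀ fuel x shared, 1 ≤ x → (shared = 0 ∨ Good item target shared) →
      whileA item target i x shared fuel = 0 ∨ Good item target (whileA item target i x shared fuel) := by
  intro fuel
  induction fuel with
  | zero => intro x shared _ h; simpa [whileA] using h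
  | succ fuel ih =>
    intro x shared hx h
    simp only [whileA]
    split
    · rename_i hc
      apply ih (x + 1) (max shared x) (by omega)
      have hgx : Good item target x := ⟨hx, i, hc.1, cond_iff.mp hc.2⟩
      rcases le_total shared x with hle | hle
      · right; rwa [max_eq_right hle]
      · rw [max_eq_left hle]; exact h
    · exact h

-- if the loop condition holds for every x in [x, j], the while loop reaches j and records it
theorem whileA_run (item target : List Char) (i : Nat) :
    ∀ fuel x shared j, x ≤ j → j + 1 ≤ x + fuel →
      (∀ z, x ≤ z → z ≤ j → i + z ≤ item.length ∧ (item.drop i).take z <:+: target) →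
      j ≤ whileA item target i x shared fuel := by
  intro fuel
  induction fuel with
  | zero => intro x shared j h1 h2 _; omega
  | succ fuel ih =>
    intro x shared j h1 h2 hall
    have hx := hall x le_rfl h1
    simp only [whileA]
    rw [if_pos ⟨hx.1, cond_iff.mpr hx.2⟩]
    rcases Nat.eq_or_lt_of_le h1 with rfl | hlt
    · exact le_trans (le_max_right _ _) (whileA_ge item target i fuel (x + 1) (max shared x))
    · exact ih (x + 1) (max shared x) j (by omega) (by omega) (fun z hz1 hz2 => hall z (by omega) hz2)

theorem foldl_sharedA_ge (item target : List Char) :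
    ∀ (L : List Nat) (s : Nat),
      s ≤ L.foldl (fun shared i => whileA item target i 1 shared item.length) s := by
  intro L
  induction L with
  | nil => intro s; simp
  | cons a L ih =>
    intro s
    exact le_trans (whileA_ge item target a item.length 1 s) (ih _)

theorem foldl_sharedA_sound (item target : List Char) :
    ∀ (L : List Nat) (s : Nat), (s = 0 ∨ Good item target s) →
      (L.foldl (fun shared i => whileA item target i 1 shared item.length) s = 0 ∨
        Good item target (L.foldl (fun shared i => whileA item target i 1 shared item.length) s)) := by
  intro L
  induction L with
  | nil => intro s h; simpa using h
  | cons a L ih =>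
    intro s h
    simp only [List.foldl_cons]
    exact ih _ (whileA_sound item target a item.length 1 s le_rfl h)

theorem sharedA_sound (item target : List Char) :
    sharedA item target = 0 ∨ Good item target (sharedA item target) :=
  foldl_sharedA_sound item target (List.range item.length) 0 (Or.inl rfl)

theorem sharedA_complete (item target : List Char) {k : Nat} (h : Good item target k) :
    k ≤ sharedA item target := by
  obtain ⟨h1, i, hi, hinf⟩ := h
  have hmem : i ∈ List.range item.length := List.mem_range.mpr (by omega)
  obtain ⟨L1, L2, hL⟩ := List.append_of_mem hmem
  unfold sharedA
  rw [hL, List.foldl_append, List.foldl_cons]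
  refine le_trans ?_ (foldl_sharedA_ge item target L2 _)
  apply whileA_run item target i item.length 1 _ k h1 (by omega)
  intro z hz1 hz2
  refine ⟨by omega, ?_⟩
  have hpref : (item.drop i).take z <+: (item.drop i).take k := by
    have hz : (item.drop i).take z = ((item.drop i).take k).take z := by
      rw [List.take_take, min_eq_left hz2]
    rw [hz]; exact List.take_prefix _ _
  exact List.IsInfix.trans hpref.isInfix hinf

-- ---------- B side: the DP table -----------

-- eDp xs ts i j = length of the longest common suffix of xs[:i] and ts[:j] (for i,j in range)
def eDp (xs ts : List Char) : Nat → Nat → Nat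
  | 0, _ => 0
  | _ + 1, 0 => 0
  | i + 1, j + 1 => if xs.getD i default = ts.getD j default then eDp xs ts i j + 1 else 0

theorem eDp_zero_right (xs ts : List Char) (i : Nat) : eDp xs ts i 0 = 0 := by
  cases i <;> rfl

-- the row after processing i item characters
def Row (xs ts : List Char) (i : Nat) : List Nat :=
  (List.range ts.length).map (fun k => eDp xs ts i (k + 1))

theorem rowGo_eval (c : Char) (e : Nat → Nat) :
    ∀ (ts' : List Char) (j0 : Nat),
      rowGo c (ts'.zip ((List.range ts'.length).map (fun k => e (j0 + k + 1)))) (e j0)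
        = (List.range ts'.length).map (fun k => if c = ts'.getD k default then e (j0 + k) + 1 else 0) := by
  intro ts'
  induction ts' with
  | nil => intro j0; simp [rowGo]
  | cons tc rest ih =>
    intro j0
    have h1 : List.map ((fun k => e (j0 + k + 1)) ∘ Nat.succ) (List.range rest.length)
        = List.map (fun k => e ((j0 + 1) + k + 1)) (List.range rest.length) := by
      apply List.map_congr_left; intro k _
      show e (j0 + (k + 1) + 1) = e (j0 + 1 + k + 1)
      have : j0 + (k + 1) + 1 = j0 + 1 + k + 1 := by omega
      rw [this]
    have h2 : List.map ((fun k => if c = (tc :: rest).getD k default then e (j0 + k) + 1 else 0) ∘ Nat.succ)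
          (List.range rest.length)
        = List.map (fun k => if c = rest.getD k default then e ((j0 + 1) + k) + 1 else 0)
          (List.range rest.length) := by
      apply List.map_congr_left; intro k _
      show (if c = (tc :: rest).getD (k + 1) default then e (j0 + (k + 1)) + 1 else 0) = _
      rw [List.getD_cons_succ]
      have : j0 + (k + 1) = j0 + 1 + k := by omega
      rw [this]
    calc rowGo c ((tc :: rest).zip
            ((List.range (tc :: rest).length).map (fun k => e (j0 + k + 1)))) (e j0)
        = (if c = tc then e j0 + 1 else 0) ::
            rowGo c (rest.zip ((List.range rest.length).map (fun k => e ((j0 + 1) + k + 1))))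
              (e (j0 + 0 + 1)) := by
          simp only [List.length_cons, List.range_succ_eq_map, List.map_cons, List.map_map,
            List.zip_cons_cons, rowGo, h1]
      _ = (List.range (tc :: rest).length).map
            (fun k => if c = (tc :: rest).getD k default then e (j0 + k) + 1 else 0) := by
          rw [show e (j0 + 0 + 1) = e (j0 + 1) by norm_num, ih (j0 + 1)]
          simp only [List.length_cons, List.range_succ_eq_map, List.map_cons, List.map_map, h2]
          simp

theorem getD_of_drop {xs : List Char} {i : Nat} {c : Char} {suf : List Char}
    (h : xs.drop i = c :: suf) : xs.getD i default = c := by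
  have h0 : xs[i]? = some c := by
    have := congrArg (fun l => l[0]?) h
    simpa [List.getElem?_drop] using this
  simp [List.getD, h0]

theorem step_row (xs ts : List Char) (i : Nat) :
    rowGo (xs.getD i default) (ts.zip (Row xs ts i)) 0 = Row xs ts (i + 1) := by
  have h := rowGo_eval (xs.getD i default) (fun j => eDp xs ts i j) ts 0
  simp only [eDp_zero_right, Nat.zero_add] at h
  unfold Row
  rw [h]
  apply List.map_congr_left
  intro k _
  rw [eDp]

-- soundness of a DP cell: its value is a common-substring length
theorem eDp_sound (xs ts : List Char) :
    ∀ i j, i ≤ xs.length → j ≤ ts.length →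
      eDp xs ts i j ≤ i ∧ eDp xs ts i j ≤ j ∧
        (xs.take i).drop (i - eDp xs ts i j) = (ts.take j).drop (j - eDp xs ts i j) := by
  intro i
  induction i with
  | zero =>
    intro j _ _
    refine ⟨by simp [eDp], by simp [eDp], ?_⟩
    simp [eDp]
  | succ i ih =>
    intro j hi hj
    cases j with
    | zero =>
      refine ⟨by simp [eDp], by simp [eDp], ?_⟩
      simp [eDp]
    | succ j =>
      rw [eDp]
      split
      · rename_i hc
        obtain ⟨h1, h2, h3⟩ := ih j (by omega) (by omega)
        refine ⟨by omega, by omega, ?_⟩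
        have hxi : i < xs.length := by omega
        have htj : j < ts.length := by omega
        have e1 : xs.take (i + 1) = xs.take i ++ [xs[i]] := by
          rw [List.take_succ]; simp [List.getElem?_eq_getElem hxi]
        have e2 : ts.take (j + 1) = ts.take j ++ [ts[j]] := by
          rw [List.take_succ]; simp [List.getElem?_eq_getElem htj]
        rw [e1, e2,
          List.drop_append_of_le_length (by simp [List.length_take]; omega),
          List.drop_append_of_le_length (by simp [List.length_take]; omega)]
        have hceq : xs[i] = ts[j] := by
          simpa [List.getD_eq_getElem?_getD, List.getElem?_eq_getElem hxi,
            List.getElem?_eq_getElem htj] using hc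
        rw [show i + 1 - (eDp xs ts i j + 1) = i - eDp xs ts i j by omega,
          show j + 1 - (eDp xs ts i j + 1) = j - eDp xs ts i j by omega, h3, hceq]
      · refine ⟨by omega, by omega, ?_⟩
        simp

-- completeness of the DP: any matching pair of suffixes is counted
theorem eDp_complete (xs ts : List Char) :
    ∀ h i j, h ≤ i → i ≤ xs.length → h ≤ j → j ≤ ts.length →
      (xs.take i).drop (i - h) = (ts.take j).drop (j - h) → h ≤ eDp xs ts i j := by
  intro h
  induction h with
  | zero => intro i j _ _ _ _ _; omega
  | succ h ih =>
    intro i j hhi hi hhj hj heq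
    cases i with
    | zero => omega
    | succ i =>
      cases j with
      | zero => omega
      | succ j =>
        have hxi : i < xs.length := by omega
        have htj : j < ts.length := by omega
        have e1 : xs.take (i + 1) = xs.take i ++ [xs[i]] := by
          rw [List.take_succ]; simp [List.getElem?_eq_getElem hxi]
        have e2 : ts.take (j + 1) = ts.take j ++ [ts[j]] := by
          rw [List.take_succ]; simp [List.getElem?_eq_getElem htj]
        rw [e1, e2,
          List.drop_append_of_le_length (by simp [List.length_take]; omega),
          List.drop_append_of_le_length (by simp [List.length_take]; omega),
          show i + 1 - (h + 1) = i - h by omega,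
          show j + 1 - (h + 1) = j - h by omega] at heq
        have hlen : ((xs.take i).drop (i - h)).length = ((ts.take j).drop (j - h)).length := by
          simp [List.length_drop, List.length_take]; omega
        obtain ⟨heq', hlast⟩ := List.append_inj heq (by simpa using hlen)
        have hceq : xs[i] = ts[j] := by simpa using hlast
        have hrec := ih i j (by omega) (by omega) (by omega) (by omega) heq'
        rw [eDp, if_pos (by
          simpa [List.getD_eq_getElem?_getD, List.getElem?_eq_getElem hxi,
            List.getElem?_eq_getElem htj] using hceq)]
        omega

theorem eDp_good (xs ts : List Char) (i j : Nat) (hi : i ≤ xs.length) (hj : j ≤ ts.length) :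
    eDp xs ts i j = 0 ∨ Good xs ts (eDp xs ts i j) := by
  rcases Nat.eq_zero_or_pos (eDp xs ts i j) with h0 | hpos
  · exact Or.inl h0
  · right
    obtain ⟨h1, h2, h3⟩ := eDp_sound xs ts i j hi hj
    set v := eDp xs ts i j with hv
    refine ⟨hpos, i - v, by omega, ?_⟩
    have lhs : (xs.drop (i - v)).take v = (xs.take i).drop (i - v) := by
      rw [List.drop_take, show i - (i - v) = v by omega]
    have rhs : (ts.take j).drop (j - v) = (ts.drop (j - v)).take v := by
      rw [List.drop_take, show j - (j - v) = v by omega]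
    rw [lhs, h3, rhs]
    exact List.IsInfix.trans (List.take_prefix _ _).isInfix (List.drop_suffix _ _).isInfix

theorem good_eDp (xs ts : List Char) {k : Nat} (h : Good xs ts k) :
    ∃ i j, i ≤ xs.length ∧ j ≤ ts.length ∧ k ≤ eDp xs ts i j := by
  obtain ⟨h1, a, ha, hinf⟩ := h
  obtain ⟨s, t, hts⟩ := hinf
  have hwlen : ((xs.drop a).take k).length = k := by
    simp [List.length_take, List.length_drop]; omega
  refine ⟨a + k, s.length + k, by omega, ?_, ?_⟩
  · have : ts.length = s.length + (((xs.drop a).take k).length + t.length) := by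
      rw [← hts]; simp
    omega
  · apply eDp_complete xs ts k (a + k) (s.length + k) (by omega) (by omega) (by omega)
    · have : ts.length = s.length + (((xs.drop a).take k).length + t.length) := by
        rw [← hts]; simp
      omega
    · rw [show a + k - k = a by omega, show s.length + k - k = s.length by omega,
        List.drop_take, show a + k - a = k by omega]
      have hdrop : ts.drop s.length = (xs.drop a).take k ++ t := by
        rw [← hts, List.append_assoc, List.drop_left]
      rw [List.drop_take, show s.length + k - s.length = k by omega, hdrop,
        List.take_left' hwlen]

-- ---------- B side: the fold over item characters ----------

theorem if_gt_eq_max : (fun (s v : Nat) => if v > s then v else s) = (fun s v => max s v) := by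
  funext s v
  rcases Nat.lt_or_ge s v with h | h
  · simp [h, Nat.max_eq_right (le_of_lt h)]
  · simp [Nat.not_lt.mpr h, Nat.max_eq_left h]

theorem mem_Row {xs ts : List Char} {i : Nat} {v : Nat} (h : v ∈ Row xs ts i) :
    ∃ k, k < ts.length ∧ v = eDp xs ts i (k + 1) := by
  obtain ⟨k, hk, hv⟩ := List.mem_map.mp h
  exact ⟨k, List.mem_range.mp hk, hv.symm⟩

theorem eDp_mem_Row {xs ts : List Char} {i k : Nat} (hk : k < ts.length) :
    eDp xs ts i (k + 1) ∈ Row xs ts i :=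
  List.mem_map.mpr ⟨k, List.mem_range.mpr hk, rfl⟩

theorem fold_inv (xs ts : List Char) :
    ∀ (suf : List Char) (i s : Nat), xs.drop i = suf →
      (s = 0 ∨ Good xs ts s) →
      (∀ i' j, i' ≤ i → j ≤ ts.length → eDp xs ts i' j ≤ s) →
      ((suf.foldl (fun (acc : Nat × List Nat) ch =>
          let nr := rowGo ch (ts.zip acc.2) 0
          (nr.foldl (fun s v => if v > s then v else s) acc.1, nr)) (s, Row xs ts i)).1 = 0 ∨
        Good xs ts ((suf.foldl (fun (acc : Nat × List Nat) ch =>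
          let nr := rowGo ch (ts.zip acc.2) 0
          (nr.foldl (fun s v => if v > s then v else s) acc.1, nr)) (s, Row xs ts i)).1)) ∧
      (∀ i' j, i' ≤ xs.length → j ≤ ts.length →
        eDp xs ts i' j ≤ (suf.foldl (fun (acc : Nat × List Nat) ch =>
          let nr := rowGo ch (ts.zip acc.2) 0
          (nr.foldl (fun s v => if v > s then v else s) acc.1, nr)) (s, Row xs ts i)).1) := by
  intro suf
  induction suf with
  | nil =>
    intro i s hdrop hsound hcomp
    have hlen : xs.length ≤ i := by
      have := congrArg List.length hdrop
      simp [List.length_drop] at this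
      omega
    exact ⟨hsound, fun i' j hi' hj => hcomp i' j (by omega) hj⟩
  | cons c suf ih =>
    intro i s hdrop hsound hcomp
    have hi : i < xs.length := by
      have := congrArg List.length hdrop
      simp [List.length_drop] at this
      omega
    have hc : xs.getD i default = c := getD_of_drop hdrop
    have hdrop' : xs.drop (i + 1) = suf := by
      rw [← List.tail_drop, hdrop]; rfl
    simp only [List.foldl_cons]
    rw [← hc, step_row xs ts i, if_gt_eq_max]
    set s' := (Row xs ts (i + 1)).foldl (fun s v => max s v) s with hs'
    have hge := PySem.List.le_foldl_max (Row xs ts (i + 1)) s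
    have hsound' : s' = 0 ∨ Good xs ts s' := by
      rcases PySem.List.foldl_max_mem (Row xs ts (i + 1)) s with hmem | hmem
    -- s' is either the old s or a DP cell of the new row
      · rw [hs', hmem]; exact hsound
      · obtain ⟨k, hk, hv⟩ := mem_Row hmem
        rw [hs', hv]
        exact eDp_good xs ts (i + 1) (k + 1) (by omega) (by omega)
    have hcomp' : ∀ i' j, i' ≤ i + 1 → j ≤ ts.length → eDp xs ts i' j ≤ s' := by
      intro i' j hi' hj
      rcases Nat.lt_or_ge i' (i + 1) with hlt | hge'
      · exact le_trans (hcomp i' j (by omega) hj) hge.1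
      · have : i' = i + 1 := by omega
        subst this
        cases j with
        | zero => simp [eDp_zero_right]
        | succ k => exact hge.2 _ (eDp_mem_Row (by omega))
    have hih := ih (i + 1) s' hdrop' hsound' hcomp'
    rw [if_gt_eq_max] at hih
    exact hih

theorem Row_zero (xs ts : List Char) : Row xs ts 0 = List.replicate ts.length 0 := by
  simp [Row, eDp]

theorem bestShared_sound (xs ts : List Char) :
    bestShared xs ts = 0 ∨ Good xs ts (bestShared xs ts) := by
  have h := fold_inv xs ts xs 0 0 (by simp) (Or.inl rfl)
    (by intro i' j hi' _; interval_cases i'; simp [eDp])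
  rw [Row_zero] at h
  exact h.1

theorem bestShared_complete (xs ts : List Char) {k : Nat} (h : Good xs ts k) :
    k ≤ bestShared xs ts := by
  obtain ⟨i, j, hi, hj, hk⟩ := good_eDp xs ts h
  have hinv := fold_inv xs ts xs 0 0 (by simp) (Or.inl rfl)
    (by intro i' j hi' _; interval_cases i'; simp [eDp])
  rw [Row_zero] at hinv
  exact le_trans hk (hinv.2 i j hi hj)

-- ---------- glue: the two scores coincide ----------

@[simp] theorem shared_eq (item target : List Char) : sharedA item target = bestShared item target := by
  apply le_antisymm
  · rcases sharedA_sound item target with h | h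
    · omega
    · exact bestShared_complete item target h
  · rcases bestShared_sound item target with h | h
    · omega
    · exact sharedA_complete item target h

theorem find?_eq_contains (keys : List String) (target : String) :
    keys.find? (fun i => i == target) = if keys.contains target then some target else none := by
  induction keys with
  | nil => simp
  | cons a keys ih =>
    by_cases h : a = target
    · subst h; simp
    · have hab : (a == target) = false := by simpa using h
      simp [hab, ih, Ne.symm h]

-- ---------- glue: A's running best vs B's max over scored pairs ----------

-- folding PySem.List.max?'s first two elements into one
theorem max?_cons_cons {α κ : Type} [LT κ] [DecidableLT κ] (key : α → κ) (m x : α) (xs : List α) :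
    PySem.List.max? (m :: x :: xs) key
      = PySem.List.max? ((if key m < key x then x else m) :: xs) key := by
  by_cases h : key m < key x <;> simp [PySem.List.max?, h]

-- max(..) with a key over a nonempty list IS the running-maximum loop
theorem max?_fold {α κ : Type} [LT κ] [DecidableLT κ] (key : α → κ) :
    ∀ (xs : List α) (m : α),
      PySem.List.max? (m :: xs) key
        = some (xs.foldl (fun mm y => if key mm < key y then y else mm) m) := by
  intro xs
  induction xs with
  | nil => intro m; simp [PySem.List.max?]
  | cons x xs ih =>
    intro m
    rw [max?_cons_cons key m x xs, ih, List.foldl_cons]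

-- A's running (best_match, best_share) agrees with the projection of B's running maximum
theorem sync (f : String → Nat) :
    ∀ (t : List String) (m : Option String × Nat),
      (t.foldl (fun acc item => if f item > acc.2 then ((some item : Option String), f item) else acc)
          ((if m.2 > 0 then m.1 else none), m.2)).1
      = (if (t.foldl (fun acc item =>
            if acc.2 < f item then ((some item : Option String), f item) else acc) m).2 > 0
         then (t.foldl (fun acc item =>
            if acc.2 < f item then ((some item : Option String), f item) else acc) m).1
         else none) := by
  intro t
  induction t with
  | nil => intro m; rfl
  | cons k t ih =>
    intro m
    simp only [List.foldl_cons]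
    by_cases hk : m.2 < f k
    · have hfk : 0 < f k := by omega
      rw [if_pos (show f k > ((if m.2 > 0 then m.1 else none), m.2).2 from hk), if_pos hk]
      have h := ih ((some k : Option String), f k)
      rw [show ((if ((some k : Option String), f k).2 > 0 then ((some k : Option String), f k).1 else none),
          ((some k : Option String), f k).2) = ((some k : Option String), f k) by simp [hfk]] at h
      exact h
    · rw [if_neg (show ¬ f k > ((if m.2 > 0 then m.1 else none), m.2).2 from hk), if_neg hk]
      exact ih m

theorem maxD_scored (target : String) (k : String) (t : List String) :
    PySem.List.maxD
        ((k :: t).map (fun item => ((some item : Option String), bestShared item.toList target.toList)))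
        (fun p => p.2) ((none : Option String), 0)
      = t.foldl (fun acc item =>
          if acc.2 < bestShared item.toList target.toList
          then ((some item : Option String), bestShared item.toList target.toList) else acc)
        ((some k : Option String), bestShared k.toList target.toList) := by
  rw [PySem.List.maxD, List.map_cons,
    max?_fold (fun p : Option String × Nat => p.2)
      ((t.map (fun item => ((some item : Option String), bestShared item.toList target.toList))))
      ((some k : Option String), bestShared k.toList target.toList),
    Option.getD_some, List.foldl_map]

theorem best_eq (target : String) (keys : List String) :
    (keys.foldl (fun (acc : Option String × Nat) item =>
        let shared := sharedA item.toList target.toList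
        if shared > acc.2 then (some item, shared) else acc) (none, 0)).1
    = (if (PySem.List.maxD
            (keys.map (fun item => ((some item : Option String), bestShared item.toList target.toList)))
            (fun p => p.2) ((none : Option String), 0)).2 > 0
       then (PySem.List.maxD
            (keys.map (fun item => ((some item : Option String), bestShared item.toList target.toList)))
            (fun p => p.2) ((none : Option String), 0)).1
       else none) := by
  cases keys with
  | nil => rfl
  | cons k t =>
    rw [maxD_scored]
    simp only [List.foldl_cons, shared_eq]
    have hs := sync (fun item => bestShared item.toList target.toList) t
      ((some k : Option String), bestShared k.toList target.toList)
    dsimp only at hs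
    by_cases hfk : bestShared k.toList target.toList > 0
    · rw [if_pos hfk]
      rw [if_pos hfk] at hs
      exact hs
    · have hfk0 : bestShared k.toList target.toList = 0 := by omega
      rw [if_neg hfk]
      rw [if_neg hfk] at hs
      rw [show ((none : Option String), bestShared k.toList target.toList)
          = ((none : Option String), 0) by rw [hfk0]] at hs
      exact hs

-- ===== VERDICT (by name: the statement is the Claim_ definition above) =====
theorem look_for_spec : Claim_equal_look_for := by
  intro l target _
  show look_for l target = look_for_alt l target
  rw [look_for, look_for_alt]
  simp only []
  rw [find?_eq_contains]
  by_cases hc : target ∈ (PySem.Dict.ofList l).keys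
  · simp [hc]
  · simp only [List.contains_eq_mem, decide_eq_true_eq]
    rw [if_neg hc, if_neg hc]
    exact best_eq target (PySem.Dict.ofList l).keys
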